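-- pv_equiv track=rewrite | github.com/aimiktena/algorithms-and-data-structures-assignments | assignment-2024-1/tromino_tiling.py | assign_neighbours
-- ===== SOURCE A (Python) =====
-- def are_adjacent(position1, position2):
--     x1, y1 = position1
--     x2, y2 = position2
--     return (abs(x1 - x2) == 1 and y1 == y2) or (abs(y1 - y2) == 1 and x1 == x2)
--
-- def assign_neighbours(tromino_positions):
--     num_trominos = len(tromino_positions)
--     # INITIALIZE LIST OF LISTS FOR STORING THE NEIGHBOURS
--     neighbours = [[] for _ in range(num_trominos)]
--     for i in range(num_trominos):
--         for j in range(i + 1, num_trominos):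
--             for position1 in tromino_positions[i]:
--                 for position2 in tromino_positions[j]:
--                     if are_adjacent(position1, position2):
--                         neighbours[i].append(j)
--                         neighbours[j].append(i)
--                         break
--                 else:
--                     continue
--                 break
--     return neighbours
-- ===== SOURCE B (Python) =====
-- def assign_neighbours(tromino_positions):
--     n = len(tromino_positions)
--     cell_sets = [set(cells) for cells in tromino_positions]
--
--     def touches(i, j):
--         s = cell_sets[i]
--         return any((x + dx, y + dy) in s
--                    for (x, y) in tromino_positions[j]
--                    for (dx, dy) in ((1, 0), (-1, 0), (0, 1), (0, -1)))
--
--     return [[j for j in range(n) if j != i and touches(i, j)] for i in range(n)]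
-- ===== Notes on version B (the rewrite author's own statement) =====
-- stated objective: faster
-- what changed: Replaces A's quadruple loop (all cell pairs of every tromino pair) by per-tromino hash sets of cells probed at the four neighbour offsets, so each pair test is O(k) set lookups instead of O(k^2) cell comparisons.
import Mathlib
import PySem

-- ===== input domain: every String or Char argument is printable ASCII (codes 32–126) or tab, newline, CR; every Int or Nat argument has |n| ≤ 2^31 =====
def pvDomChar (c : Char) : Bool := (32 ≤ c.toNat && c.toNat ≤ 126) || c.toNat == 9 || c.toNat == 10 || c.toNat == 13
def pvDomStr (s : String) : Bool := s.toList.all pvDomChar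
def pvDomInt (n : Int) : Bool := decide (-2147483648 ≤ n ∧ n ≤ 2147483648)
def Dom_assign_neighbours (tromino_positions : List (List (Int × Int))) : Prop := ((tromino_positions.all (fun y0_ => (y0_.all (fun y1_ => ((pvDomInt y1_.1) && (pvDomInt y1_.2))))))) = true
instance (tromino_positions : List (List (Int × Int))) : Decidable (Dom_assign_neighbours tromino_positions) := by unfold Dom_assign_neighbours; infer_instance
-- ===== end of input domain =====

-- B replaces A's pairwise quadruple scan by per-tromino hash sets of cells probed at the four
-- neighbour offsets (one O(k) existence test per ordered pair instead of O(k^2) cell pairs).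

-- ===== PORT A =====
def are_adjacent (position1 position2 : Int × Int) : Bool :=
  ((position1.1 - position2.1).natAbs == 1 && position1.2 == position2.2) ||
  ((position1.2 - position2.2).natAbs == 1 && position1.1 == position2.1)

-- The Python `for position1 …: for position2 …: if adjacent: append; append; break / else: continue / break`
-- scans the cell pairs for a first adjacent one and appends (j to row i, i to row j) exactly once if
-- one exists; `List.any` is that first-hit scan, the two `List.modify` are the two appends.
def assign_neighbours (tromino_positions : List (List (Int × Int))) : List (List Int) :=
  let num_trominos := tromino_positions.length
  let neighbours : List (List Int) := (List.range num_trominos).map (fun _ => [])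
  (List.range num_trominos).foldl (fun nb i =>
    (List.range' (i + 1) (num_trominos - (i + 1))).foldl (fun nb2 j =>
      if (tromino_positions.getD i []).any (fun position1 =>
           (tromino_positions.getD j []).any (fun position2 => are_adjacent position1 position2)) then
        (nb2.modify i (· ++ [(j : Int)])).modify j (· ++ [(i : Int)])
      else nb2) nb) neighbours

-- ===== PORT B =====
def touches_alt (s : PySem.Set (Int × Int)) (cells : List (Int × Int)) : Bool :=
  cells.any (fun p =>
    ([((1 : Int), (0 : Int)), (-1, 0), (0, 1), (0, -1)]).any (fun d =>
      PySem.Set.contains s (p.1 + d.1, p.2 + d.2)))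

def assign_neighbours_alt (tromino_positions : List (List (Int × Int))) : List (List Int) :=
  let n := tromino_positions.length
  let cell_sets : List (PySem.Set (Int × Int)) :=
    tromino_positions.map (fun cells => PySem.Set.ofList cells)
  (List.range n).map (fun i =>
    ((List.range n).filter (fun j =>
      j != i && touches_alt (cell_sets.getD i []) (tromino_positions.getD j []))).map
      (fun j => (j : Int)))

-- ===== PRECONDITION & SPEC =====
def Spec_assign_neighbours (tromino_positions : List (List (Int × Int))) (out : List (List Int)) : Prop := out = assign_neighbours_alt tromino_positions
instance (tromino_positions : List (List (Int × Int))) (out : List (List Int)) : Decidable (Spec_assign_neighbours tromino_positions out) := by unfold Spec_assign_neighbours; infer_instance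

-- ===== CLAIM (what is proved, stated in full; the proofs are below) =====
def Claim_equal_assign_neighbours : Prop := ∀ (tromino_positions : List (List (Int × Int))), Dom_assign_neighbours tromino_positions → Spec_assign_neighbours tromino_positions (assign_neighbours tromino_positions)

-- ===== LEMMAS AND PROOFS =====

-- A's pair test: some cell of tromino k is adjacent to some cell of tromino m.
def adjAt (tps : List (List (Int × Int))) (k m : Nat) : Bool :=
  (tps.getD k []).any (fun p1 => (tps.getD m []).any (fun p2 => are_adjacent p1 p2))

lemma are_adjacent_symm (p q : Int × Int) : are_adjacent p q = are_adjacent q p := by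
  unfold are_adjacent
  rw [Bool.eq_iff_iff]
  simp only [Bool.or_eq_true, Bool.and_eq_true, beq_iff_eq]
  omega

def condA (tps : List (List (Int × Int))) (k m t s : Nat) : Bool :=
  decide (m ≠ k) && adjAt tps k m &&
    (decide (min k m < t) || (decide (min k m = t) && decide (max k m < s)))

def stateAt (tps : List (List (Int × Int))) (t s : Nat) : List (List Int) :=
  (List.range tps.length).map (fun k =>
    ((List.range tps.length).filter (fun m => condA tps k m t s)).map (fun m => (m : Int)))

def innerStep (tps : List (List (Int × Int))) (i : Nat) :
    List (List Int) → Nat → List (List Int) := fun nb2 j =>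
  if (tps.getD i []).any (fun p1 => (tps.getD j []).any (fun p2 => are_adjacent p1 p2)) then
    (nb2.modify i (· ++ [(j : Int)])).modify j (· ++ [(i : Int)])
  else nb2

lemma adjAt_symm (tps : List (List (Int × Int))) (k m : Nat) :
    adjAt tps k m = adjAt tps m k := by
  unfold adjAt
  rw [Bool.eq_iff_iff]
  simp only [List.any_eq_true]
  constructor
  · rintro ⟨p1, h1, p2, h2, ha⟩
    exact ⟨p2, h2, p1, h1, by rw [are_adjacent_symm]; exact ha⟩
  · rintro ⟨p1, h1, p2, h2, ha⟩
    exact ⟨p2, h2, p1, h1, by rw [are_adjacent_symm]; exact ha⟩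

lemma modify_map_range {α : Type} (n i : Nat) (f : Nat → α) (g : α → α) (hi : i < n) :
    ((List.range n).map f).modify i g
      = (List.range n).map (fun k => if k = i then g (f i) else f k) := by
  apply List.ext_getElem
  · simp
  · intro j h1 h2
    simp only [List.getElem_modify, List.getElem_map, List.getElem_range] at *
    split_ifs with h h' h'
    · subst h'; rfl
    · omega
    · omega
    · rfl

lemma filter_range_snoc (n s : Nat) (p q : Nat → Bool) (hs : s < n)
    (hq : ∀ m, q m = (p m || m == s)) (hp : ∀ m, s ≤ m → p m = false) :
    (List.range n).filter q = (List.range n).filter p ++ [s] := by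
  induction n with
  | zero => omega
  | succ n ih =>
    rw [List.range_succ, List.filter_append, List.filter_append]
    by_cases h : s = n
    · subst h
      have h1 : (List.range s).filter q = (List.range s).filter p := by
        apply List.filter_congr
        intro m hm
        simp only [List.mem_range] at hm
        have hms : (m == s) = false := by simp; omega
        rw [hq, hms, Bool.or_false]
      have h2 : [s].filter q = [s] := by
        have : q s = true := by rw [hq, hp s le_rfl]; simp
        simp [this]
      have h3 : [s].filter p = [] := by simp [hp s le_rfl]
      rw [h1, h2, h3]; simp
    · have hn : s < n := by omega
      have hqn : q n = false := by
        have : (n == s) = false := by simp; omega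
        rw [hq, this, Bool.or_false, hp n (by omega)]
      have hpn : p n = false := hp n (by omega)
      rw [ih hn]
      simp [hqn, hpn]

lemma map_cast_append (xs : List Nat) (v : Nat) :
    (xs ++ [v]).map (fun m => (m : Int)) = xs.map (fun m => (m : Int)) ++ [(v : Int)] := by
  simp

lemma stateAt_zero (tps : List (List (Int × Int))) :
    stateAt tps 0 1 = (List.range tps.length).map (fun _ => ([] : List Int)) := by
  unfold stateAt
  apply List.map_congr_left
  intro k hk
  have : (List.range tps.length).filter (fun m => condA tps k m 0 1) = [] := by
    rw [List.filter_eq_nil_iff]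
    intro m hm
    simp only [condA, Bool.and_eq_true, Bool.or_eq_true, decide_eq_true_iff]
    rintro ⟨⟨h1, _⟩, h2⟩
    omega
  rw [this]; rfl

lemma state_roll (tps : List (List (Int × Int))) (t : Nat) :
    stateAt tps t tps.length = stateAt tps (t + 1) (t + 2) := by
  unfold stateAt
  apply List.map_congr_left
  intro k hk
  simp only [List.mem_range] at hk
  have hf : List.filter (fun m => condA tps k m t tps.length) (List.range tps.length)
      = List.filter (fun m => condA tps k m (t + 1) (t + 2)) (List.range tps.length) := by
    apply List.filter_congr
    intro m hm
    simp only [List.mem_range] at hm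
    unfold condA
    rw [Bool.eq_iff_iff]
    simp only [Bool.and_eq_true, Bool.or_eq_true, decide_eq_true_iff]
    constructor
    · rintro ⟨⟨h1, h2⟩, h3⟩
      exact ⟨⟨h1, h2⟩, by omega⟩
    · rintro ⟨⟨h1, h2⟩, h3⟩
      exact ⟨⟨h1, h2⟩, by omega⟩
  rw [hf]

lemma inner_step_eq (tps : List (List (Int × Int))) (t s : Nat)
    (ht : t < s) (hs : s < tps.length) :
    innerStep tps t (stateAt tps t s) s = stateAt tps t (s + 1) := by
  have htn : t < tps.length := by omega
  unfold innerStep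
  show (if adjAt tps t s = true then _ else _) = _
  by_cases hadj : adjAt tps t s = true
  · rw [if_pos hadj]
    unfold stateAt
    rw [modify_map_range _ _ _ _ htn, modify_map_range _ _ _ _ hs]
    apply List.map_congr_left
    intro k hk
    simp only [List.mem_range] at hk
    by_cases hks : k = s
    · have hA : adjAt tps k t = true := by
        rw [hks, adjAt_symm]; exact hadj
      rw [if_pos hks, if_neg (by omega)]
      have hfr : (List.range tps.length).filter (fun m => condA tps k m t (s + 1))
          = (List.range tps.length).filter (fun m => condA tps k m t s) ++ [t] := by
        apply filter_range_snoc _ _ _ _ htn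
        · intro m
          by_cases hmt : m = t
          · have hAm : adjAt tps k m = true := by rw [hmt]; exact hA
            have h1 : condA tps k m t (s + 1) = true := by
              simp only [condA, Bool.and_eq_true, Bool.or_eq_true, decide_eq_true_iff]
              exact ⟨⟨by omega, hAm⟩, by omega⟩
            have h2 : condA tps k m t s = false := by
              simp only [condA, Bool.and_eq_false_iff]
              right
              simp only [Bool.or_eq_false_iff, Bool.and_eq_false_iff, decide_eq_false_iff_not]
              omega
            rw [h1, h2, hmt]; simp
          · have hbe : (m == t) = false := by simp [hmt]
            rw [hbe, Bool.or_false]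
            unfold condA
            rw [Bool.eq_iff_iff]
            simp only [Bool.and_eq_true, Bool.or_eq_true, decide_eq_true_iff]
            constructor
            · rintro ⟨h1, h2⟩; exact ⟨h1, by omega⟩
            · rintro ⟨h1, h2⟩; exact ⟨h1, by omega⟩
        · intro m hm
          simp only [condA, Bool.and_eq_false_iff]
          right
          simp only [Bool.or_eq_false_iff, Bool.and_eq_false_iff, decide_eq_false_iff_not]
          omega
      rw [hfr, map_cast_append, hks]
    · by_cases hkt : k = t
      · have hA : ∀ m, m = s → adjAt tps k m = true := by
          intro m hm; rw [hm, hkt]; exact hadj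
        rw [if_neg (by omega), if_pos hkt]
        have hfr : (List.range tps.length).filter (fun m => condA tps k m t (s + 1))
            = (List.range tps.length).filter (fun m => condA tps k m t s) ++ [s] := by
          apply filter_range_snoc _ _ _ _ hs
          · intro m
            by_cases hms : m = s
            · have h1 : condA tps k m t (s + 1) = true := by
                simp only [condA, Bool.and_eq_true, Bool.or_eq_true, decide_eq_true_iff]
                exact ⟨⟨by omega, hA m hms⟩, by omega⟩
              have h2 : condA tps k m t s = false := by
                simp only [condA, Bool.and_eq_false_iff]
                right
                simp only [Bool.or_eq_false_iff, Bool.and_eq_false_iff, decide_eq_false_iff_not]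
                omega
              rw [h1, h2, hms]; simp
            · have hbe : (m == s) = false := by simp [hms]
              rw [hbe, Bool.or_false]
              unfold condA
              rw [Bool.eq_iff_iff]
              simp only [Bool.and_eq_true, Bool.or_eq_true, decide_eq_true_iff]
              constructor
              · rintro ⟨h1, h2⟩; exact ⟨h1, by omega⟩
              · rintro ⟨h1, h2⟩; exact ⟨h1, by omega⟩
          · intro m hm
            simp only [condA, Bool.and_eq_false_iff]
            right
            simp only [Bool.or_eq_false_iff, Bool.and_eq_false_iff, decide_eq_false_iff_not]
            omega
        rw [hfr, map_cast_append, hkt]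
      · rw [if_neg hks, if_neg hkt]
        have hf : (List.range tps.length).filter (fun m => condA tps k m t s)
            = (List.range tps.length).filter (fun m => condA tps k m t (s + 1)) := by
          apply List.filter_congr
          intro m hm
          simp only [List.mem_range] at hm
          unfold condA
          rw [Bool.eq_iff_iff]
          simp only [Bool.and_eq_true, Bool.or_eq_true, decide_eq_true_iff]
          constructor
          · rintro ⟨⟨h1, h2⟩, h3⟩; exact ⟨⟨h1, h2⟩, by omega⟩
          · rintro ⟨⟨h1, h2⟩, h3⟩; exact ⟨⟨h1, h2⟩, by omega⟩
        rw [hf]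
  · rw [if_neg hadj]
    unfold stateAt
    apply List.map_congr_left
    intro k hk
    simp only [List.mem_range] at hk
    have hf : (List.range tps.length).filter (fun m => condA tps k m t s)
        = (List.range tps.length).filter (fun m => condA tps k m t (s + 1)) := by
      apply List.filter_congr
      intro m hm
      simp only [List.mem_range] at hm
      by_cases hts : (k = t ∧ m = s) ∨ (k = s ∧ m = t)
      · have hAkm : adjAt tps k m = false := by
          rcases hts with ⟨rfl, rfl⟩ | ⟨rfl, rfl⟩
          · exact Bool.eq_false_iff.mpr hadj
          · rw [adjAt_symm]; exact Bool.eq_false_iff.mpr hadj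
        simp [condA, hAkm]
      · unfold condA
        rw [Bool.eq_iff_iff]
        simp only [Bool.and_eq_true, Bool.or_eq_true, decide_eq_true_iff]
        constructor
        · rintro ⟨⟨h1, h2⟩, h3⟩; exact ⟨⟨h1, h2⟩, by omega⟩
        · rintro ⟨⟨h1, h2⟩, h3⟩; exact ⟨⟨h1, h2⟩, by omega⟩
    rw [hf]

lemma inner_fold (tps : List (List (Int × Int))) (t : Nat) (c s : Nat)
    (ht : t < s) (hc : s + c = tps.length) :
    (List.range' s c).foldl (innerStep tps t) (stateAt tps t s) = stateAt tps t tps.length := by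
  induction c generalizing s with
  | zero => simp only [List.range'_zero, List.foldl_nil]; rw [show s = tps.length by omega]
  | succ c ih =>
    rw [List.range'_succ, List.foldl_cons, inner_step_eq tps t s ht (by omega)]
    exact ih (s + 1) (by omega) (by omega)

lemma outer_fold (tps : List (List (Int × Int))) (c t : Nat) (hc : t + c = tps.length) :
    (List.range' t c).foldl
      (fun nb i => (List.range' (i + 1) (tps.length - (i + 1))).foldl (innerStep tps i) nb)
      (stateAt tps t (t + 1)) = stateAt tps tps.length (tps.length + 1) := by
  induction c generalizing t with
  | zero => simp only [List.range'_zero, List.foldl_nil]; rw [show t = tps.length by omega]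
  | succ c ih =>
    rw [List.range'_succ, List.foldl_cons]
    rw [inner_fold tps t (tps.length - (t + 1)) (t + 1) (by omega) (by omega)]
    rw [state_roll]
    exact ih (t + 1) (by omega)

lemma assign_eq_state (tps : List (List (Int × Int))) :
    assign_neighbours tps = stateAt tps tps.length (tps.length + 1) := by
  have h0 : assign_neighbours tps
      = (List.range' 0 tps.length).foldl
          (fun nb i => (List.range' (i + 1) (tps.length - (i + 1))).foldl (innerStep tps i) nb)
          ((List.range tps.length).map (fun _ => [])) := by
    rw [← List.range_eq_range']
    rfl
  rw [h0, ← stateAt_zero]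
  exact outer_fold tps tps.length 0 (by omega)

lemma touches_eq_adjAt (tps : List (List (Int × Int))) (k m : Nat) :
    touches_alt (PySem.Set.ofList (tps.getD k [])) (tps.getD m []) = adjAt tps k m := by
  unfold touches_alt adjAt
  rw [Bool.eq_iff_iff]
  simp only [List.any_eq_true, PySem.Set.contains_iff, PySem.Set.mem_ofList]
  constructor
  · rintro ⟨p2, h2, d, hd, hmem⟩
    refine ⟨_, hmem, p2, h2, ?_⟩
    unfold are_adjacent
    fin_cases hd <;> simp
  · rintro ⟨p1, h1, p2, h2, ha⟩
    refine ⟨p2, h2, ?_⟩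
    unfold are_adjacent at ha
    simp only [Bool.or_eq_true, Bool.and_eq_true, beq_iff_eq] at ha
    have : p1 = (p2.1 + 1, p2.2) ∨ p1 = (p2.1 + -1, p2.2) ∨
           p1 = (p2.1, p2.2 + 1) ∨ p1 = (p2.1, p2.2 + -1) := by
      rcases p1 with ⟨x1, y1⟩; rcases p2 with ⟨x2, y2⟩
      simp only [Prod.mk.injEq]
      omega
    rcases this with h | h | h | h
    · exact ⟨(1, 0), by simp, by simpa [← h] using h1⟩
    · exact ⟨(-1, 0), by simp, by simpa [← h] using h1⟩
    · exact ⟨(0, 1), by simp, by simpa [← h] using h1⟩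
    · exact ⟨(0, -1), by simp, by simpa [← h] using h1⟩

lemma alt_eq_state (tps : List (List (Int × Int))) :
    assign_neighbours_alt tps = stateAt tps tps.length (tps.length + 1) := by
  unfold assign_neighbours_alt stateAt
  apply List.map_congr_left
  intro k hk
  simp only [List.mem_range] at hk
  have hsets : (tps.map (fun cells => PySem.Set.ofList cells)).getD k [] =
      PySem.Set.ofList (tps.getD k []) := by
    rcases h : tps[k]? with _ | cells
    · simp [List.getD, h, PySem.Set.ofList]
    · simp [List.getD, h]
  have hf : (List.range tps.length).filter (fun j =>
        j != k && touches_alt ((tps.map (fun cells => PySem.Set.ofList cells)).getD k [])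
          (tps.getD j []))
      = (List.range tps.length).filter (fun m => condA tps k m tps.length (tps.length + 1)) := by
    apply List.filter_congr
    intro m hm
    simp only [List.mem_range] at hm
    rw [hsets, touches_eq_adjAt]
    unfold condA
    rw [Bool.eq_iff_iff]
    simp only [Bool.and_eq_true, Bool.or_eq_true, decide_eq_true_iff, bne_iff_ne, ne_eq]
    constructor
    · rintro ⟨h1, h2⟩; exact ⟨⟨h1, h2⟩, by omega⟩
    · rintro ⟨⟨h1, h2⟩, h3⟩; exact ⟨h1, h2⟩
  rw [hf]

-- ===== VERDICT (by name: the statement is the Claim_ definition above) =====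
theorem assign_neighbours_spec : Claim_equal_assign_neighbours := by
  intro tps _
  unfold Spec_assign_neighbours
  rw [assign_eq_state, alt_eq_state]
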